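-- pv_equiv track=rewrite | github.com/vstkrc/SoftDesSp15 | test_space/hawaiian_scrabble_score.py | hawaiian
-- ===== SOURCE A (Python) =====
-- def hawaiian(text):
-- 	lowercase = text.lower()
-- 	points = {"a": 1, "k": 2, "o": 2, "i": 3, "n": 3, "e": 4, "u": 5, "h": 6, "l": 7, "m": 8, "p": 8, "w": 9}
-- 	total = 0
-- 	for char in lowercase:
-- 		if char not in points:
-- 			return -1
-- 		else:
-- 			total += points[char]
-- 	return total
-- ===== SOURCE B (Python) =====
-- def hawaiian(text):
--     lowercase = text.lower()
--     points = {"a": 1, "k": 2, "o": 2, "i": 3, "n": 3, "e": 4, "u": 5, "h": 6, "l": 7, "m": 8, "p": 8, "w": 9}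
--     total = 0
--     matched = 0
--     for letter, pts in points.items():
--         n = lowercase.count(letter)
--         total += pts * n
--         matched += n
--     if matched != len(lowercase):
--         return -1
--     return total
-- ===== Notes on version B (the rewrite author's own statement) =====
-- stated objective: alternative
-- what changed: Instead of scanning the text character by character with an early return, B loops over the fixed 12-letter alphabet, tallies pts * lowercase.count(letter) per letter, and decides validity afterwards by comparing the total matched count with the string length.
import Mathlib
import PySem

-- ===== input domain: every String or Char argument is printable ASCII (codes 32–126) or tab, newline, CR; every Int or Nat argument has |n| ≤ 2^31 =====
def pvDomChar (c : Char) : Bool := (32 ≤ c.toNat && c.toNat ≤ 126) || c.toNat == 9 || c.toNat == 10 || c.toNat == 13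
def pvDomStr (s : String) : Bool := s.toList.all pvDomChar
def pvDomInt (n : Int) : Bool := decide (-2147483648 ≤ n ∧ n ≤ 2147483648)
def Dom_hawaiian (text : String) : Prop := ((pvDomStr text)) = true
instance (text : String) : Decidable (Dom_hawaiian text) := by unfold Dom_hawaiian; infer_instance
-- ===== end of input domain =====

-- B replaces A's per-character scan with early return by a loop over the fixed
-- 12-letter alphabet: per-letter occurrence counting (str.count), validity decided
-- afterwards by comparing the total matched count with the string length
-- (objective: alternative algorithm — traverses the alphabet, not the text).

-- ===== PORT A =====
-- the Hawaiian letter-score dict (the same literal appears in both Pythons)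
def pointsA : PySem.Dict Char Int :=
  PySem.Dict.ofList [('a', 1), ('k', 2), ('o', 2), ('i', 3), ('n', 3), ('e', 4),
                     ('u', 5), ('h', 6), ('l', 7), ('m', 8), ('p', 8), ('w', 9)]

-- the 'for char in lowercase' loop with its early 'return -1'
def hawaiianLoop (cs : List Char) (total : Int) : Int :=
  match cs with
  | [] => total
  | c :: rest =>
    if pointsA.contains c = false then -1
    else hawaiianLoop rest (total + pointsA.getD c 0)

def hawaiian (text : String) : Int :=
  hawaiianLoop (PySem.Str.lower text).toList 0

-- ===== PORT B =====
-- 'for letter, pts in points.items(): n = lowercase.count(letter); total += pts*n; matched += n'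
def hawaiian_alt (text : String) : Int :=
  let lowercase := (PySem.Str.lower text).toList
  let st := pointsA.items.foldl
    (fun (st : Int × Int) (p : Char × Int) =>
      let n : Int := (PySem.Chars.count lowercase [p.1] : Int)
      (st.1 + p.2 * n, st.2 + n))
    ((0 : Int), (0 : Int))
  if st.2 ≠ (lowercase.length : Int) then -1 else st.1

-- ===== PRECONDITION & SPEC =====
def Spec_hawaiian (text : String) (out : Int) : Prop := out = hawaiian_alt text
instance (text : String) (out : Int) : Decidable (Spec_hawaiian text out) := by unfold Spec_hawaiian; infer_instance

-- ===== CLAIM (what is proved, stated in full; the proofs are below) =====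
def Claim_equal_hawaiian : Prop := ∀ (text : String), Dom_hawaiian text → Spec_hawaiian text (hawaiian text)

-- ===== LEMMAS AND PROOFS =====

-- A's loop, characterised: -1 if any invalid character occurs, else the accumulated sum.
theorem hawaiianLoop_eq (cs : List Char) (total : Int) :
    hawaiianLoop cs total =
      if ∀ c ∈ cs, pointsA.contains c = true then total + (cs.map (fun c => pointsA.getD c 0)).sum
      else -1 := by
  induction cs generalizing total with
  | nil => simp [hawaiianLoop]
  | cons c rest ih =>
    by_cases hc : pointsA.contains c = true
    · simp [hawaiianLoop, hc, ih]
      split_ifs with h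
      · ring
      · rfl
    · have hcf : pointsA.contains c = false := by simpa using hc
      simp [hawaiianLoop, hcf]

-- str.count with a one-character pattern counts occurrences of that character
theorem countGo_singleton (c : Char) (l : List Char) (fuel acc : Nat)
    (h : l.length ≤ fuel) :
    PySem.Chars.count.go [c] fuel l acc = acc + l.count c := by
  induction l generalizing fuel acc with
  | nil => cases fuel <;> simp [PySem.Chars.count.go]
  | cons a t ih =>
    cases fuel with
    | zero => exact absurd h (by simp)
    | succ f =>
      have hf : t.length ≤ f := by simpa using h
      by_cases hc : c = a
      · subst hc
        simp [PySem.Chars.count.go, List.isPrefixOf, ih f (acc + 1) hf]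
        omega
      · have hca : (c == a) = false := by simp [hc]
        have hac : (a == c) = false := by simp [Ne.symm hc]
        simp [PySem.Chars.count.go, List.isPrefixOf, hca, hac, ih f acc hf, List.count_cons]

theorem count_singleton (l : List Char) (c : Char) :
    PySem.Chars.count l [c] = l.count c := by
  have := countGo_singleton c l l.length 0 le_rfl
  simpa [PySem.Chars.count] using this

-- the concrete items list of the dict
def pairsP : List (Char × Int) :=
  [('a', 1), ('k', 2), ('o', 2), ('i', 3), ('n', 3), ('e', 4),
   ('u', 5), ('h', 6), ('l', 7), ('m', 8), ('p', 8), ('w', 9)]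

theorem items_eq : pointsA.items = pairsP := by decide

-- B's fold over the pair list, characterised as two map-sums
theorem foldl_pair (g : Char → Int) (P : List (Char × Int)) (t m : Int) :
    P.foldl (fun (st : Int × Int) (p : Char × Int) => (st.1 + p.2 * g p.1, st.2 + g p.1)) (t, m)
      = (t + (P.map (fun p => p.2 * g p.1)).sum, m + (P.map (fun p => g p.1)).sum) := by
  induction P generalizing t m with
  | nil => simp
  | cons a P ih =>
    simp only [List.foldl_cons, List.map_cons, List.sum_cons, ih]
    refine Prod.ext ?_ ?_ <;> simp <;> ring

-- per-character delta: counting one occurrence of c across the pair list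
theorem delta_cnt (c : Char) :
    (pairsP.map (fun p => if p.1 = c then (1 : Int) else 0)).sum
      = if pointsA.contains c = true then (1 : Int) else 0 := by
  by_cases h1 : 'a' = c; · subst h1; decide
  by_cases h2 : 'k' = c; · subst h2; decide
  by_cases h3 : 'o' = c; · subst h3; decide
  by_cases h4 : 'i' = c; · subst h4; decide
  by_cases h5 : 'n' = c; · subst h5; decide
  by_cases h6 : 'e' = c; · subst h6; decide
  by_cases h7 : 'u' = c; · subst h7; decide
  by_cases h8 : 'h' = c; · subst h8; decide
  by_cases h9 : 'l' = c; · subst h9; decide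
  by_cases h10 : 'm' = c; · subst h10; decide
  by_cases h11 : 'p' = c; · subst h11; decide
  by_cases h12 : 'w' = c; · subst h12; decide
  have hc : pointsA.contains c = false := by
    simp [PySem.Dict.contains, items_eq, pairsP, h1, h2, h3, h4, h5, h6, h7, h8, h9, h10, h11, h12]
  simp [pairsP, hc, h1, h2, h3, h4, h5, h6, h7, h8, h9, h10, h11, h12]

-- per-character delta: the score contributed by one occurrence of c
theorem delta_pts (c : Char) :
    (pairsP.map (fun p => if p.1 = c then p.2 else 0)).sum
      = if pointsA.contains c = true then pointsA.getD c 0 else 0 := by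
  by_cases h1 : 'a' = c; · subst h1; decide
  by_cases h2 : 'k' = c; · subst h2; decide
  by_cases h3 : 'o' = c; · subst h3; decide
  by_cases h4 : 'i' = c; · subst h4; decide
  by_cases h5 : 'n' = c; · subst h5; decide
  by_cases h6 : 'e' = c; · subst h6; decide
  by_cases h7 : 'u' = c; · subst h7; decide
  by_cases h8 : 'h' = c; · subst h8; decide
  by_cases h9 : 'l' = c; · subst h9; decide
  by_cases h10 : 'm' = c; · subst h10; decide
  by_cases h11 : 'p' = c; · subst h11; decide
  by_cases h12 : 'w' = c; · subst h12; decide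
  have hc : pointsA.contains c = false := by
    simp [PySem.Dict.contains, items_eq, pairsP, h1, h2, h3, h4, h5, h6, h7, h8, h9, h10, h11, h12]
  simp [pairsP, hc, h1, h2, h3, h4, h5, h6, h7, h8, h9, h10, h11, h12]

-- total matched count = number of valid characters of l
theorem sum_counts (l : List Char) :
    (pairsP.map (fun p => ((l.count p.1 : Nat) : Int))).sum
      = ((l.countP (fun c => pointsA.contains c) : Nat) : Int) := by
  induction l with
  | nil => simp [pairsP]
  | cons c l ih =>
    have hstep : (pairsP.map (fun p => (((c :: l).count p.1 : Nat) : Int))).sum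
        = (pairsP.map (fun p => ((l.count p.1 : Nat) : Int) + (if p.1 = c then (1 : Int) else 0))).sum := by
      apply congrArg
      apply List.map_congr_left
      intro p _
      by_cases h : p.1 = c
      · simp [h]
      · simp [h, Ne.symm h]
    rw [hstep, List.sum_map_add, ih, delta_cnt, List.countP_cons]
    by_cases hc : pointsA.contains c = true <;> simp [hc]

-- total score = sum of per-character scores, when every character is valid
theorem sum_scores (l : List Char) (hall : ∀ c ∈ l, pointsA.contains c = true) :
    (pairsP.map (fun p => p.2 * ((l.count p.1 : Nat) : Int))).sum
      = (l.map (fun c => pointsA.getD c 0)).sum := by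
  induction l with
  | nil => simp [pairsP]
  | cons c l ih =>
    have hstep : (pairsP.map (fun p => p.2 * (((c :: l).count p.1 : Nat) : Int))).sum
        = (pairsP.map (fun p => p.2 * ((l.count p.1 : Nat) : Int) + (if p.1 = c then p.2 else 0))).sum := by
      apply congrArg
      apply List.map_congr_left
      intro p _
      by_cases h : p.1 = c
      · simp [h]; ring
      · simp [h, Ne.symm h]
    have hc : pointsA.contains c = true := hall c (List.mem_cons_self ..)
    rw [hstep, List.sum_map_add, ih (fun x hx => hall x (List.mem_cons_of_mem _ hx)), delta_pts]
    simp [hc]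
    ring

-- ===== VERDICT (by name: the statement is the Claim_ definition above) =====
theorem hawaiian_spec : Claim_equal_hawaiian := by
  intro text _
  unfold Spec_hawaiian hawaiian hawaiian_alt
  simp only [count_singleton, items_eq]
  generalize (PySem.Str.lower text).toList = L
  rw [hawaiianLoop_eq,
      foldl_pair (fun c => ((L.count c : Nat) : Int)) pairsP 0 0]
  by_cases hall : ∀ c ∈ L, pointsA.contains c = true
  · have hlen : L.countP (fun c => pointsA.contains c) = L.length :=
      List.countP_eq_length.mpr hall
    rw [if_pos hall, sum_counts, hlen]
    simp [sum_scores L hall]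
  · have hne : L.countP (fun c => pointsA.contains c) ≠ L.length :=
      fun h => hall (List.countP_eq_length.mp h)
    have hlt : ((L.countP (fun c => pointsA.contains c) : Nat) : Int) ≠ ((L.length : Nat) : Int) := by
      exact_mod_cast hne
    rw [if_neg hall, sum_counts]
    simp [hlt]
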